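-- pv_equiv track=rewrite | github.com/Mcusac/kaggle-ml-comp-scripts | scripts/layers/layer_1_competition/level_1_impl/level_arc_agi_2/level_2/llm_tta_inference.py | _safe_grid
-- ===== SOURCE A (Python) =====
-- from typing import Any, Mapping
--
-- Grid = list[list[int]]
--
-- def _safe_grid(grid: Any, fallback: Grid) -> Grid:
--     if not isinstance(grid, list):
--         return fallback
--     if not grid:
--         return []
--     if not all(isinstance(row, list) for row in grid):
--         return fallback
--     width = len(grid[0])
--     if any(len(row) != width for row in grid):
--         return fallback
--     try:
--         return [[int(v) % 10 for v in row] for row in grid]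
--     except Exception:
--         return fallback
-- ===== SOURCE B (Python) =====
-- def _safe_grid(grid, fallback):
--     if not isinstance(grid, list):
--         return fallback
--     if not grid:
--         return []
--     if not isinstance(grid[0], list):
--         return fallback
--
--     def go(rows, width):
--         # Recursively convert; None signals any validation/conversion failure.
--         if not rows:
--             return []
--         head = rows[0]
--         if not isinstance(head, list) or len(head) != width:
--             return None
--         rest = go(rows[1:], width)
--         if rest is None:
--             return None
--         try:
--             converted = [int(v) % 10 for v in head]
--         except Exception:
--             return None
--         return [converted] + rest
--
--     result = go(grid, len(grid[0]))
--     return fallback if result is None else result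
-- ===== Notes on version B (the rewrite author's own statement) =====
-- stated objective: alternative
-- what changed: Replaces A's staged iterative passes (all-lists check, any-width check, nested comprehension) with a structural recursion over the rows that propagates failure as an Option (None) and builds the converted grid by consing on the way out of the recursion.
import Mathlib
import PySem

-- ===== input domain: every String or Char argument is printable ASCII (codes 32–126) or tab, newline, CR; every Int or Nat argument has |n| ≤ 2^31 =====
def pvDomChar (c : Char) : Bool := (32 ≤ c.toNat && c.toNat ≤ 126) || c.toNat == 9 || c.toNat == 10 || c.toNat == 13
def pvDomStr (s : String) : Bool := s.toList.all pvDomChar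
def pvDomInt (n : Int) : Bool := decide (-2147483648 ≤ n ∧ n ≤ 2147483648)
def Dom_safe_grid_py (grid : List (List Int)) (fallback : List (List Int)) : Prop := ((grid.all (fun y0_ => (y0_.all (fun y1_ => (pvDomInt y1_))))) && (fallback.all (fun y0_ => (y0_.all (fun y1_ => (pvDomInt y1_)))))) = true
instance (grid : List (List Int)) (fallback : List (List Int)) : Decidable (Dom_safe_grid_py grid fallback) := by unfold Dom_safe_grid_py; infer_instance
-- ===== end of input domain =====

-- B: structural recursion with Option-style failure propagation instead of A's staged passes (alternative decomposition, same cost).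
-- ===== PORT A =====
-- Port of A: isinstance checks are always true at this type; int(v) never raises, so the try/except body always returns.
def safe_grid_py (grid : List (List Int)) (fallback : List (List Int)) : List (List Int) :=
  match grid with
  | [] => []
  | r0 :: _ =>
    if grid.any (fun row => decide (row.length ≠ r0.length)) then fallback
    else grid.map (fun row => row.map (fun v => PySem.Int.mod v 10))

-- ===== PORT B =====
-- Recursive helper: none = validation failure; builds the converted grid on the way out.
def pvGo (rows : List (List Int)) (width : Nat) : Option (List (List Int)) :=
  match rows with
  | [] => some []
  | head :: t =>
    if head.length ≠ width then none
    else
      match pvGo t width with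
      | none => none
      | some rest => some ((head.map (fun v => PySem.Int.mod v 10)) :: rest)

def safe_grid_py_alt (grid : List (List Int)) (fallback : List (List Int)) : List (List Int) :=
  match grid with
  | [] => []
  | r0 :: _ =>
    match pvGo grid r0.length with
    | none => fallback
    | some result => result

-- ===== PRECONDITION & SPEC =====
def Spec_safe_grid_py (grid : List (List Int)) (fallback : List (List Int)) (out : List (List Int)) : Prop := out = safe_grid_py_alt grid fallback
instance (grid : List (List Int)) (fallback : List (List Int)) (out : List (List Int)) : Decidable (Spec_safe_grid_py grid fallback out) := by unfold Spec_safe_grid_py; infer_instance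

-- ===== CLAIM (what is proved, stated in full; the proofs are below) =====
def Claim_equal_safe_grid_py : Prop := ∀ (grid : List (List Int)) (fallback : List (List Int)), Dom_safe_grid_py grid fallback → Spec_safe_grid_py grid fallback (safe_grid_py grid fallback)

-- ===== LEMMAS AND PROOFS =====

theorem pvGo_eq (rows : List (List Int)) (width : Nat) :
    pvGo rows width =
      if rows.any (fun row => decide (row.length ≠ width)) then none
      else some (rows.map (fun row => row.map (fun v => PySem.Int.mod v 10))) := by
  induction rows with
  | nil => simp [pvGo]
  | cons r rs ih =>
    simp only [pvGo, List.any_cons, List.map_cons]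
    by_cases h : r.length = width
    · simp [h, ih]
      split_ifs <;> rfl
    · simp [h]

-- ===== VERDICT (by name: the statement is the Claim_ definition above) =====
theorem safe_grid_py_spec : Claim_equal_safe_grid_py := by
  intro grid fallback _
  unfold Spec_safe_grid_py safe_grid_py safe_grid_py_alt
  cases grid with
  | nil => rfl
  | cons r0 rs =>
    simp only []
    rw [pvGo_eq]
    by_cases h : ∃ x ∈ rs, ¬x.length = r0.length
    · simp [h]
    · simp [h]
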